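-- pv_equiv track=rewrite | github.com/cctbx/cctbx_project | libtbx/utils.py | n_dim_index_from_one_dim
-- ===== SOURCE A (Python) =====
-- def n_dim_index_from_one_dim(i1d, sizes):
--   assert len(sizes) > 0
--   result = []
--   for sz in reversed(sizes):
--     assert sz > 0
--     result.append(i1d % sz)
--     i1d //= sz
--   result.reverse()
--   return result
-- ===== SOURCE B (Python) =====
-- def n_dim_index_from_one_dim(i1d, sizes):
--   assert len(sizes) > 0
--   p = 1
--   for sz in sizes:
--     assert sz > 0
--     p *= sz
--   out = []
--   for sz in sizes:
--     p //= sz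
--     out.append((i1d // p) % sz)
--   return out
-- ===== Notes on version B (the rewrite author's own statement) =====
-- stated objective: alternative
-- what changed: A iterates reversed(sizes) mutating the running index (append i1d % sz; i1d //= sz) and reverses the result; B makes two forward passes, first computing the total product of the sizes and then dividing that product down so each coordinate comes out directly as (i1d // suffix_product) % sz in natural order, with no reverse and no mutation of i1d.
import Mathlib
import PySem

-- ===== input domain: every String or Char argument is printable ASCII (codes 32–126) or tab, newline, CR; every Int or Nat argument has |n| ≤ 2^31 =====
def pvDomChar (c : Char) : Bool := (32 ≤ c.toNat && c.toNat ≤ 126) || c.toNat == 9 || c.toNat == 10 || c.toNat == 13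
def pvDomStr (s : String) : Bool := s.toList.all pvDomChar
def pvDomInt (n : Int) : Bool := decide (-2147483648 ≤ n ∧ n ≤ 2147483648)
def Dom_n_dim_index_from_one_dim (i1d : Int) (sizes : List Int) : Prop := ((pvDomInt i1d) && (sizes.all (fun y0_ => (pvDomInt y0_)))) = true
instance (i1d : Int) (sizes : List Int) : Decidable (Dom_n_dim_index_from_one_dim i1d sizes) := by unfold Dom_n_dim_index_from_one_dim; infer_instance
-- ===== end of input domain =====

-- B replaces A's reversed-iteration with mutating index by two forward passes (total product,
-- then divide it down and take (i1d // suffix_product) % sz): alternative decomposition.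

-- ===== PORT A =====
-- A: iterate reversed(sizes), appending i1d % sz and floor-dividing i1d, then reverse the result.
def n_dim_index_from_one_dim (i1d : Int) (sizes : List Int) : List Int :=
  (sizes.reverse.foldl
    (fun (st : List Int × Int) sz =>
      (st.1 ++ [PySem.Int.mod st.2 sz], PySem.Int.floordiv st.2 sz))
    ([], i1d)).1.reverse

-- ===== PORT B =====
-- B: first pass multiplies all sizes into p; second forward pass divides p back down
-- so after 'p //= sz' p is the suffix product, and appends (i1d // p) % sz.
def n_dim_index_from_one_dim_alt (i1d : Int) (sizes : List Int) : List Int :=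
  let p0 := sizes.foldl (fun p sz => p * sz) 1
  (sizes.foldl
    (fun (st : Int × List Int) sz =>
      let q := PySem.Int.floordiv st.1 sz
      (q, st.2 ++ [PySem.Int.mod (PySem.Int.floordiv i1d q) sz]))
    (p0, [])).2

-- ===== PRECONDITION & SPEC =====
-- A asserts len(sizes) > 0 and each sz > 0 (AssertionError otherwise); Pre_ excludes exactly those inputs.
def Pre_n_dim_index_from_one_dim (_i1d : Int) (sizes : List Int) : Prop :=
  sizes ≠ [] ∧ ∀ x ∈ sizes, 0 < x
instance (i1d : Int) (sizes : List Int) : Decidable (Pre_n_dim_index_from_one_dim i1d sizes) := by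
  unfold Pre_n_dim_index_from_one_dim; infer_instance

def pvWitness_n_dim_index_from_one_dim : Int × List Int := (23, [2, 3, 4])

def Spec_n_dim_index_from_one_dim (i1d : Int) (sizes : List Int) (out : List Int) : Prop := out = n_dim_index_from_one_dim_alt i1d sizes
instance (i1d : Int) (sizes : List Int) (out : List Int) : Decidable (Spec_n_dim_index_from_one_dim i1d sizes out) := by unfold Spec_n_dim_index_from_one_dim; infer_instance

-- ===== CLAIM (what is proved, stated in full; the proofs are below) =====
def Claim_equal_n_dim_index_from_one_dim : Prop := ∀ (i1d : Int) (sizes : List Int), Dom_n_dim_index_from_one_dim i1d sizes → Pre_n_dim_index_from_one_dim i1d sizes → Spec_n_dim_index_from_one_dim i1d sizes (n_dim_index_from_one_dim i1d sizes)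

-- ===== LEMMAS AND PROOFS =====

-- trace of A's loop values
def pvSpine (i : Int) : List Int → List Int
  | [] => []
  | a :: t => PySem.Int.mod i a :: pvSpine (PySem.Int.floordiv i a) t

def pvDiv (i : Int) (l : List Int) : Int := l.foldl PySem.Int.floordiv i

-- common normal form: coordinate j = (i // prod of the tail) % size j
def pvG (i : Int) : List Int → List Int
  | [] => []
  | a :: t => PySem.Int.mod (PySem.Int.floordiv i t.prod) a :: pvG i t

theorem pv_foldlA (l : List Int) : ∀ (res : List Int) (i : Int),
    l.foldl (fun (st : List Int × Int) sz =>
      (st.1 ++ [PySem.Int.mod st.2 sz], PySem.Int.floordiv st.2 sz)) (res, i)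
    = (res ++ pvSpine i l, pvDiv i l) := by
  induction l with
  | nil => intro res i; simp [pvSpine, pvDiv]
  | cons a t ih => intro res i; simp [pvSpine, pvDiv, List.foldl, ih]

theorem pv_spine_append (l1 : List Int) : ∀ (l2 : List Int) (i : Int),
    pvSpine i (l1 ++ l2) = pvSpine i l1 ++ pvSpine (pvDiv i l1) l2 := by
  induction l1 with
  | nil => intro l2 i; simp [pvSpine, pvDiv]
  | cons a t ih => intro l2 i; simp [pvSpine, pvDiv, ih, List.foldl]

theorem pv_div_eq_prod (l : List Int) : ∀ (i : Int), (∀ x ∈ l, 0 < x) →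
    pvDiv i l = PySem.Int.floordiv i l.prod := by
  induction l with
  | nil => intro i _; simp [pvDiv]
  | cons a t ih =>
    intro i h
    have ha : (0:Int) < a := h a (by simp)
    have ht : ∀ x ∈ t, (0:Int) < x := fun x hx => h x (by simp [hx])
    have htp : (0:Int) < t.prod := List.prod_pos ht
    have : pvDiv i (a :: t) = pvDiv (PySem.Int.floordiv i a) t := by simp [pvDiv, List.foldl]
    rw [this, ih _ ht]
    rw [List.prod_cons, PySem.Int.floordiv_eq_ediv_of_pos ha,
        PySem.Int.floordiv_eq_ediv_of_pos htp,
        PySem.Int.floordiv_eq_ediv_of_pos (mul_pos ha htp),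
        Int.ediv_ediv_of_nonneg (le_of_lt ha)]

theorem pv_A_eq_G (sizes : List Int) : ∀ (i : Int), (∀ x ∈ sizes, 0 < x) →
    (pvSpine i sizes.reverse).reverse = pvG i sizes := by
  induction sizes with
  | nil => intro i _; simp [pvSpine, pvG]
  | cons a t ih =>
    intro i h
    have ht : ∀ x ∈ t, (0:Int) < x := fun x hx => h x (by simp [hx])
    have htr : ∀ x ∈ t.reverse, (0:Int) < x := by simpa using ht
    have hd : pvDiv i t.reverse = PySem.Int.floordiv i t.prod := by
      rw [pv_div_eq_prod _ _ htr, List.prod_reverse]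
    simp only [List.reverse_cons, pv_spine_append, pvSpine, List.reverse_append,
      List.reverse_cons, List.reverse_nil, List.nil_append, hd, pvG]
    simp [ih _ ht]

theorem pv_prod_foldl (l : List Int) : l.foldl (fun p sz => p * sz) 1 = l.prod := by
  simp [List.prod_eq_foldl]

theorem pv_B_loop (i : Int) (l : List Int) : ∀ (res : List Int), (∀ x ∈ l, 0 < x) →
    (l.foldl
      (fun (st : Int × List Int) sz =>
        let q := PySem.Int.floordiv st.1 sz
        (q, st.2 ++ [PySem.Int.mod (PySem.Int.floordiv i q) sz]))
      (l.prod, res)).2 = res ++ pvG i l := by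
  induction l with
  | nil => intro res _; simp [pvG]
  | cons a t ih =>
    intro res h
    have ha : (0:Int) < a := h a (by simp)
    have ht : ∀ x ∈ t, (0:Int) < x := fun x hx => h x (by simp [hx])
    have hq : PySem.Int.floordiv ((a :: t).prod) a = t.prod := by
      rw [List.prod_cons, PySem.Int.floordiv_eq_ediv_of_pos ha,
          Int.mul_ediv_cancel_left _ (ne_of_gt ha)]
    simp only [List.foldl_cons, hq]
    rw [ih _ ht]
    simp [pvG]

-- ===== VERDICT (by name: the statement is the Claim_ definition above) =====
theorem n_dim_index_from_one_dim_spec : Claim_equal_n_dim_index_from_one_dim := by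
  intro i1d sizes _ hpre
  unfold Spec_n_dim_index_from_one_dim n_dim_index_from_one_dim n_dim_index_from_one_dim_alt
  rw [pv_foldlA, pv_prod_foldl, pv_B_loop _ _ _ hpre.2]
  simp only [List.nil_append]
  rw [pv_A_eq_G _ _ hpre.2]
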